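-- pv_equiv track=rewrite | github.com/Tetiana2370/python | zestaw4/z2.py | get_ruler
-- ===== SOURCE A (Python) =====
-- def get_ruler(x=5):
--     if x<0:
--         x*=-1
--
--     L = list()
--
--     for i in range(x*5+1):
--         if(i%5 == 0):
--           L.append("|")
--         else:
--           L.append(".")
--
--     L.append("\n0")
--
--     for i in range(1, x+1):
--         L.append(str("%5s" % str(i)))
--     return "".join(L)
-- ===== SOURCE B (Python) =====
-- def get_ruler(x=5):
--     n = -x if x < 0 else x
--     ticks = "|" + "....|" * n
--     labels = "".join("%5s" % i for i in range(1, n + 1))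
--     return ticks + "\n0" + labels
-- ===== Notes on version B (the rewrite author's own statement) =====
-- stated objective: simpler
-- what changed: Replaces the per-character loop with its i%5 branch by the closed-form string repetition of '....|', and the label-appending loop by a single join over a generator.
import Mathlib
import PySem

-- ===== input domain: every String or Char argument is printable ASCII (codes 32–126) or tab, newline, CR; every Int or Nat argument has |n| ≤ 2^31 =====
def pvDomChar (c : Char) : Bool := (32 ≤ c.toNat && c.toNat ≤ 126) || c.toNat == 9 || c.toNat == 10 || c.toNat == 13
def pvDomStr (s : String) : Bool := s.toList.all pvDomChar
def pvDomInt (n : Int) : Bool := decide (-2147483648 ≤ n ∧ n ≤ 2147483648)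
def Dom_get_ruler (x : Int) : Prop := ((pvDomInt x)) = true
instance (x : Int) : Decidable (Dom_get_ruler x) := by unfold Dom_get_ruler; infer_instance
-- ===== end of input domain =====

-- B replaces A's per-character loop (with its i%5 branch) by the closed-form
-- repetition '|' + '....|'*n and a single join for the labels: simpler, same cost.

-- "%5s" % str(i)  (right-justify str(i) in width 5 with spaces); shared by both Pythons
def fmt5 (i : Int) : List Char :=
  let s := PySem.Int.toChars i
  List.replicate (5 - s.length) ' ' ++ s

-- ===== PORT A =====
def get_ruler (x : Int) : String :=
  let x := if x < 0 then x * (-1) else x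
  let L : List (List Char) :=
    (PySem.List.pyRange 0 (x * 5 + 1) 1).foldl
      (fun L i => L ++ [if PySem.Int.mod i 5 == 0 then ['|'] else ['.']]) []
  let L := L ++ [['\n', '0']]
  let L := (PySem.List.pyRange 1 (x + 1) 1).foldl (fun L i => L ++ [fmt5 i]) L
  String.ofList (PySem.Chars.join [] L)

-- ===== PORT B =====
def get_ruler_alt (x : Int) : String :=
  let n : Int := if x < 0 then -x else x
  let ticks : List Char := '|' :: PySem.List.pyRepeat "....|".toList n
  let labels : List Char :=
    PySem.Chars.join [] ((PySem.List.pyRange 1 (n + 1) 1).map fmt5)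
  String.ofList (ticks ++ ('\n' :: '0' :: labels))

-- ===== PRECONDITION & SPEC =====
def Spec_get_ruler (x : Int) (out : String) : Prop := out = get_ruler_alt x
instance (x : Int) (out : String) : Decidable (Spec_get_ruler x out) := by unfold Spec_get_ruler; infer_instance

-- ===== CLAIM (what is proved, stated in full; the proofs are below) =====
def Claim_equal_get_ruler : Prop := ∀ (x : Int), Dom_get_ruler x → Spec_get_ruler x (get_ruler x)

-- ===== LEMMAS AND PROOFS =====

-- "".join with empty separator is concatenation
lemma join_nil_flatten (L : List (List Char)) : PySem.Chars.join [] L = L.flatten := by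
  induction L with
  | nil => rfl
  | cons a t ih =>
    cases t with
    | nil => simp [PySem.Chars.join, List.intercalate]
    | cons b t' =>
      rw [PySem.Chars.join_cons_cons, ih]
      simp

lemma tick_of_mod (i : Int) (h : i % 5 ≠ 0) :
    (if PySem.Int.mod i 5 == 0 then (['|'] : List Char) else ['.']) = ['.'] := by
  simp [h]

lemma tick_of_dvd (i : Int) (h : i % 5 = 0) :
    (if PySem.Int.mod i 5 == 0 then (['|'] : List Char) else ['.']) = ['|'] := by
  simp [h]

lemma tick_flatten (m : Nat) :
    ((PySem.List.pyRange 0 ((m : Int) * 5 + 1) 1).map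
        (fun i => if PySem.Int.mod i 5 == 0 then ['|'] else ['.'])).flatten
      = '|' :: PySem.List.pyRepeat "....|".toList (m : Int) := by
  induction m with
  | zero => decide
  | succ k ih =>
    have hsplit : PySem.List.pyRange 0 ((((k : Nat) + 1 : Nat) : Int) * 5 + 1) 1
        = PySem.List.pyRange 0 ((k : Int) * 5 + 1) 1
          ++ PySem.List.pyRange ((k : Int) * 5 + 1) ((k : Int) * 5 + 6) 1 := by
      rw [← PySem.List.pyRange_one_append 0 ((k : Int) * 5 + 1) ((k : Int) * 5 + 6)
        (by omega) (by omega)]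
      congr 1
      push_cast
      ring
    rw [hsplit, List.map_append, List.flatten_append, ih]
    have e1 : PySem.List.pyRange ((k : Int) * 5 + 1) ((k : Int) * 5 + 6) 1
        = [(k : Int) * 5 + 1, (k : Int) * 5 + 2, (k : Int) * 5 + 3,
           (k : Int) * 5 + 4, (k : Int) * 5 + 5] := by
      rw [PySem.List.pyRange_one_cons (by omega), PySem.List.pyRange_one_cons (by omega),
          PySem.List.pyRange_one_cons (by omega), PySem.List.pyRange_one_cons (by omega),
          PySem.List.pyRange_one_cons (by omega), PySem.List.pyRange_one_eq_nil (by omega)]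
      norm_num
      omega
    rw [e1]
    simp only [List.map_cons, List.map_nil, List.flatten]
    rw [tick_of_mod _ (by omega), tick_of_mod _ (by omega), tick_of_mod _ (by omega),
        tick_of_mod _ (by omega), tick_of_dvd _ (by omega)]
    simp only [PySem.List.pyRepeat, Int.toNat_natCast, List.replicate_succ']
    simp

-- ===== VERDICT (by name: the statement is the Claim_ definition above) =====
theorem get_ruler_spec : Claim_equal_get_ruler := by
  intro x _
  show get_ruler x = get_ruler_alt x
  unfold get_ruler get_ruler_alt
  have hx : (if x < 0 then x * (-1) else x) = ((x.natAbs : Nat) : Int) := by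
    split_ifs with h <;> omega
  have hx' : (if x < 0 then -x else x) = ((x.natAbs : Nat) : Int) := by
    split_ifs with h <;> omega
  rw [hx, hx']
  generalize x.natAbs = m
  simp only [PySem.List.foldl_append_singleton_eq_map, List.nil_append]
  rw [join_nil_flatten, join_nil_flatten]
  simp only [List.flatten_append]
  rw [tick_flatten m]
  simp
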